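-- pv_equiv track=rewrite | github.com/Loryerba/Commitment_Schemes | CF_VC-RSA/CatalanoFioreVC(rsa_version).py | evaluate_Si
-- ===== SOURCE A (Python) =====
-- import math
--
-- def evaluate_Si(primes:list, a:int, n:int) -> list:
--     num = len(primes)
--     if num == 1:
--         return [a]
--
--     a1 = []
--     a2 = []
--
--     partial_a1 = a
--     partial_a2 = a
--
--     #for each primes number append a^primes[i] mod n
--     for i in range(math.floor(len(primes)/2)):
--         partial_a2 = pow(partial_a2, primes[i], n)
--         a1.append(primes[i])
--     #for each primes number append a^primes[i] mod n
--     for i in range(math.floor(len(primes)/2), len(primes)):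
--         partial_a1 = pow(partial_a1, primes[i], n)
--         a2.append(primes[i])
--
--     #recursive call to self fun
--     l1 = evaluate_Si(a1, partial_a1, n)
--     l2 = evaluate_Si(a2, partial_a2, n)
--
--     si_list = []
--     for element in l1:
--         si_list.append(element)
--     for element in l2:
--         si_list.append(element)
--
--     return si_list
-- ===== SOURCE B (Python) =====
-- def evaluate_Si(primes: list, a: int, n: int) -> list:
--     if len(primes) == 1:
--         return [a]
--     m = len(primes)
--     pre = [1] * m
--     for i in range(1, m):
--         pre[i] = pre[i - 1] * primes[i - 1]
--     suf = [1] * m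
--     for i in range(m - 2, -1, -1):
--         suf[i] = suf[i + 1] * primes[i + 1]
--     return [pow(a, pre[i] * suf[i], n) for i in range(m)]
-- ===== Notes on version B (the rewrite author's own statement) =====
-- stated objective: alternative
-- what changed: Replaces A's divide-in-half recursion that threads nested modular pows through subcalls by two flat prefix/suffix-product passes and a single pow(a, pre[i]*suf[i], n) per index; it trades A's small-exponent pows for one pow with a large product exponent per index, so it is not faster on large inputs.
-- outside the precondition, e.g. on evaluate_Si([-1, -1], 1, 3): A returns [1, 1], B returns [1, 1]
import Mathlib
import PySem

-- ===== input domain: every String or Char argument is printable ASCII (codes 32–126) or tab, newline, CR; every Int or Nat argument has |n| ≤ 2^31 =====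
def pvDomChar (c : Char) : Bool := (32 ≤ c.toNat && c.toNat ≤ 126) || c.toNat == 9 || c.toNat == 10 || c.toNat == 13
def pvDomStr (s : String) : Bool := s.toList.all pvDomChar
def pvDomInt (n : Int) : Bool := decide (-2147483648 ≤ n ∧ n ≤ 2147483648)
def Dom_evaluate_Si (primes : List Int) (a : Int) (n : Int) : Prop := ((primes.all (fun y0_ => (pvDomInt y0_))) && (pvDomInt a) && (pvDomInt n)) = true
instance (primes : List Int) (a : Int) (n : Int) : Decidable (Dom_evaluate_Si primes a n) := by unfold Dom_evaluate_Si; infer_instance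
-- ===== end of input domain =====

-- B replaces A's halve-and-recurse tree of modular pows by two linear prefix/suffix-product
-- passes and one pow per index (an alternative decomposition of the same values).

-- ===== PORT A =====
-- square-and-multiply modular pow, reducing mod m at every step, as CPython's pow(b, e, m)
-- computes it (exact for nonnegative exponents; proved equal to PySem.Int.powMod below)
def pyPowMod (b : Int) (e : Nat) (m : Int) : Int :=
  if e = 0 then PySem.Int.mod 1 m
  else
    let h := pyPowMod (PySem.Int.mod (b * b) m) (e / 2) m
    if e % 2 = 1 then PySem.Int.mod (h * b) m else h
termination_by e

-- the loop 'for i in range(lo, hi): a_k.append(primes[i])'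
def pvSeg (primes : List Int) (lo hi : Int) : List Int :=
  (PySem.List.pyRange lo hi 1).map (fun i => PySem.List.pyGetD primes i 0)
-- the loop 'for i in range(lo, hi): partial = pow(partial, primes[i], n)'
-- ('.toNat' on the exponent is exact here: Pre_ restricts to nonnegative primes)
def pvPowLoop (primes : List Int) (lo hi : Int) (b n : Int) : Int :=
  (PySem.List.pyRange lo hi 1).foldl
    (fun acc i => pyPowMod acc (PySem.List.pyGetD primes i 0).toNat n) b

def evaluate_Si (primes : List Int) (a : Int) (n : Int) : List Int :=
  if primes.length = 1 then [a]
  else if primes.length = 0 then []   -- totality guard only: Python recurses forever on []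
  else
    -- l1 = evaluate_Si(a1, partial_a1, n); l2 = evaluate_Si(a2, partial_a2, n); si_list = l1 ++ l2
    evaluate_Si (pvSeg primes 0 (PySem.Int.floordiv primes.length 2))
                (pvPowLoop primes (PySem.Int.floordiv primes.length 2) primes.length a n) n
    ++ evaluate_Si (pvSeg primes (PySem.Int.floordiv primes.length 2) primes.length)
                   (pvPowLoop primes 0 (PySem.Int.floordiv primes.length 2) a n) n
termination_by primes.length
decreasing_by
  · simp [pvSeg, PySem.List.length_pyRange_one]
    omega
  · simp [pvSeg, PySem.List.length_pyRange_one]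
    omega

-- ===== PORT B =====
-- forward pass: pre[i] = pre[i-1] * primes[i-1]; c is the running prefix product
def preProds (c : Int) : List Int → List Int
  | [] => []
  | x :: t => c :: preProds (c * x) t
-- backward pass: suf[i] = suf[i+1] * primes[i+1]; returns (suffix-product list, whole product)
def sufProds : List Int → List Int × Int
  | [] => ([], 1)
  | x :: t =>
    let s := sufProds t
    (s.2 :: s.1, x * s.2)
-- '.toNat' on the exponent is exact here: Pre_ restricts to nonnegative primes
def evaluate_Si_alt (primes : List Int) (a : Int) (n : Int) : List Int :=
  if primes.length = 1 then [a]
  else ((preProds 1 primes).zip (sufProds primes).1).map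
         (fun ps => pyPowMod a (ps.1 * ps.2).toNat n)

-- ===== PRECONDITION & SPEC =====
-- Pre_ excludes: [] (A recurses forever); n = 0 with ≥ 2 primes (Python pow raises ValueError);
-- and lists with negative entries — outside the function's domain of prime lists — where Python
-- pow with a negative exponent raises ValueError whenever a base is not invertible mod n (in the
-- invertible corner cases A still returns, e.g. ([-1, -1], 1, 3); see the cites).
def Pre_evaluate_Si (primes : List Int) (a : Int) (n : Int) : Prop :=
  primes ≠ [] ∧ (∀ p ∈ primes, 0 ≤ p) ∧ (primes.length = 1 ∨ n ≠ 0)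
instance (primes : List Int) (a : Int) (n : Int) : Decidable (Pre_evaluate_Si primes a n) := by
  unfold Pre_evaluate_Si; infer_instance
def pvWitness_evaluate_Si : List Int × Int × Int := ([3, 5, 7], 2, 11)

def Spec_evaluate_Si (primes : List Int) (a : Int) (n : Int) (out : List Int) : Prop :=
  out = evaluate_Si_alt primes a n
instance (primes : List Int) (a : Int) (n : Int) (out : List Int) : Decidable (Spec_evaluate_Si primes a n out) := by
  unfold Spec_evaluate_Si; infer_instance

-- ===== CLAIM (what is proved, stated in full; the proofs are below) =====
def Claim_equal_evaluate_Si : Prop := ∀ (primes : List Int) (a : Int) (n : Int), Dom_evaluate_Si primes a n → Pre_evaluate_Si primes a n → Spec_evaluate_Si primes a n (evaluate_Si primes a n)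

-- ===== LEMMAS AND PROOFS =====

-- product of the entries as naturals (entries are nonnegative under Pre_)
def prodN (l : List Int) : Nat := (l.map Int.toNat).prod
-- exponent of entry i: the product of all the other entries
def othN (l : List Int) (i : Nat) : Nat := prodN (l.take i) * prodN (l.drop (i + 1))

theorem fmod_congr (a b n : Int) (h : a % n = b % n) : Int.fmod a n = Int.fmod b n := by
  rw [Int.fmod_eq_emod, Int.fmod_eq_emod, h]
  have hd : (n ∣ a) ↔ (n ∣ b) := by
    constructor <;> intro hx
    · exact Int.dvd_of_emod_eq_zero (by rw [← h]; exact Int.emod_eq_zero_of_dvd hx)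
    · exact Int.dvd_of_emod_eq_zero (by rw [h]; exact Int.emod_eq_zero_of_dvd hx)
  simp [hd]

theorem fmod_emod (c n : Int) : (Int.fmod c n) % n = c % n := by
  rw [Int.fmod_eq_emod]
  split_ifs <;> simp

theorem pyPowMod_eq (m : Int) : ∀ (e : Nat) (b : Int), pyPowMod b e m = PySem.Int.powMod b e m := by
  intro e
  induction e using Nat.strong_induction_on with
  | _ e ih =>
    intro b
    rw [pyPowMod]
    by_cases h0 : e = 0
    · simp [h0, PySem.Int.powMod]
    · simp only [if_neg h0]
      rw [ih (e / 2) (by omega) (PySem.Int.mod (b * b) m)]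
      have key : PySem.Int.powMod (PySem.Int.mod (b * b) m) (e / 2) m
          = PySem.Int.mod ((b * b) ^ (e / 2)) m := by
        unfold PySem.Int.powMod PySem.Int.mod
        exact fmod_congr _ _ _ (Int.ModEq.pow (e / 2) (fmod_emod (b * b) m))
      by_cases h1 : e % 2 = 1
      · simp only [h1, if_true]
        rw [key]
        unfold PySem.Int.powMod PySem.Int.mod
        apply fmod_congr
        have hm : (Int.fmod ((b * b) ^ (e / 2)) m) * b ≡ ((b * b) ^ (e / 2)) * b [ZMOD m] :=
          Int.ModEq.mul_right b (fmod_emod _ m)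
        calc (Int.fmod ((b * b) ^ (e / 2)) m * b) % m
            = (((b * b) ^ (e / 2)) * b) % m := hm
          _ = (b ^ e) % m := by
              congr 1
              rw [show b * b = b ^ 2 by ring, ← pow_mul, ← pow_succ]
              congr 1
              omega
      · simp only [if_neg h1]
        rw [key]
        unfold PySem.Int.powMod PySem.Int.mod
        congr 1
        rw [show b * b = b ^ 2 by ring, ← pow_mul]
        congr 1
        omega

theorem powMod_powMod (a n : Int) (x y : Nat) :
    PySem.Int.powMod (PySem.Int.powMod a x n) y n = PySem.Int.powMod a (x * y) n := by
  unfold PySem.Int.powMod PySem.Int.mod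
  apply fmod_congr
  rw [pow_mul]
  exact Int.ModEq.pow y (fmod_emod (a ^ x) n)

theorem map_getD_seg (xs : List Int) (m k : Nat) (h : m + k ≤ xs.length) :
    (List.range k).map (fun j => xs.getD (m + j) 0) = (xs.drop m).take k := by
  apply List.ext_getElem
  · simp; omega
  · intro i h1 h2
    simp at h1 ⊢
    rw [List.getElem?_eq_getElem (by omega)]
    rfl

theorem pvSeg_low (xs : List Int) (hi : Int) (_h0 : 0 ≤ hi) (hle : hi.toNat ≤ xs.length) :
    pvSeg xs 0 hi = xs.take hi.toNat := by
  unfold pvSeg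
  rw [PySem.List.pyRange_one, List.map_map, sub_zero]
  have he : ∀ j ∈ List.range hi.toNat,
      ((fun i => PySem.List.pyGetD xs i 0) ∘ fun k : Nat => (0 : Int) + ↑k) j
        = xs.getD (0 + j) 0 := by
    intro j hj
    show PySem.List.pyGetD xs ((0:Int) + ↑j) 0 = _
    rw [zero_add, PySem.List.pyGetD_natCast, Nat.zero_add]
  rw [List.map_congr_left he, map_getD_seg xs 0 hi.toNat (by omega), List.drop_zero]

theorem pvSeg_high (xs : List Int) (lo : Int) (h0 : 0 ≤ lo) (hle : lo.toNat ≤ xs.length) :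
    pvSeg xs lo xs.length = xs.drop lo.toNat := by
  unfold pvSeg
  rw [PySem.List.pyRange_one, List.map_map]
  have he : ∀ j ∈ List.range ((xs.length : Int) - lo).toNat,
      ((fun i => PySem.List.pyGetD xs i 0) ∘ fun k : Nat => lo + ↑k) j
        = xs.getD (lo.toNat + j) 0 := by
    intro j hj
    show PySem.List.pyGetD xs (lo + ↑j) 0 = _
    rw [show lo + (j : Int) = ((lo.toNat + j : Nat) : Int) by omega, PySem.List.pyGetD_natCast]
  rw [List.map_congr_left he]
  have hk : ((xs.length : Int) - lo).toNat = xs.length - lo.toNat := by omega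
  rw [hk, map_getD_seg xs lo.toNat (xs.length - lo.toNat) (by omega),
      List.take_of_length_le (by simp)]

theorem pvPowLoop_foldl (xs : List Int) (lo hi b n : Int) :
    pvPowLoop xs lo hi b n
      = (pvSeg xs lo hi).foldl (fun acc p => PySem.Int.powMod acc p.toNat n) b := by
  simp [pvPowLoop, pvSeg, List.foldl_map, pyPowMod_eq]

theorem foldl_pow (xs : List Int) (a n : Int) (t : Nat) :
    xs.foldl (fun acc p => PySem.Int.powMod acc p.toNat n) (PySem.Int.powMod a t n)
      = PySem.Int.powMod a (t * prodN xs) n := by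
  induction xs generalizing t with
  | nil => simp [prodN]
  | cons x rest ih =>
    simp only [List.foldl_cons, powMod_powMod, ih, prodN, List.map_cons, List.prod_cons]
    ring_nf

theorem foldl_pow_raw (xs : List Int) (a n : Int) (hxs : xs ≠ []) :
    xs.foldl (fun acc p => PySem.Int.powMod acc p.toNat n) a
      = PySem.Int.powMod a (prodN xs) n := by
  cases xs with
  | nil => exact absurd rfl hxs
  | cons x rest =>
    simp only [List.foldl_cons, foldl_pow, prodN, List.map_cons, List.prod_cons]

theorem prodN_append (l1 l2 : List Int) : prodN (l1 ++ l2) = prodN l1 * prodN l2 := by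
  simp [prodN]

theorem othN_low (l : List Int) (h i : Nat) (hh : h ≤ l.length) (hi : i < h) :
    othN l i = othN (l.take h) i * prodN (l.drop h) := by
  unfold othN
  rw [List.take_take, min_eq_left (by omega)]
  have hd : l.drop (i + 1) = (l.take h).drop (i + 1) ++ l.drop h := by
    conv_lhs => rw [← List.take_append_drop h l]
    rw [List.drop_append_of_le_length (by simp; omega)]
  rw [hd, prodN_append]
  ring

theorem othN_high (l : List Int) (h i : Nat) :
    othN l (h + i) = prodN (l.take h) * othN (l.drop h) i := by
  unfold othN
  have h1 : l.take (h + i) = l.take h ++ (l.drop h).take i := List.take_add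
  have h2 : l.drop (h + i + 1) = (l.drop h).drop (i + 1) := by
    rw [List.drop_drop]
    congr 1
  rw [h1, h2, prodN_append]
  ring

-- gluing the two recursive halves back into one indexed map
theorem glue (l : List Int) (a n : Int) (t : Nat) (hm : 2 ≤ l.length) :
    (List.range (l.length / 2)).map
        (fun i => PySem.Int.powMod a ((t * prodN (l.drop (l.length / 2))) * othN (l.take (l.length / 2)) i) n)
      ++ (List.range (l.length - l.length / 2)).map
        (fun i => PySem.Int.powMod a ((t * prodN (l.take (l.length / 2))) * othN (l.drop (l.length / 2)) i) n)
      = (List.range l.length).map (fun i => PySem.Int.powMod a (t * othN l i) n) := by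
  set hN := l.length / 2 with hdef
  have hsplit : l.length = hN + (l.length - hN) := by omega
  conv_rhs => rw [hsplit, List.range_add, List.map_append, List.map_map]
  congr 1
  · apply List.map_congr_left
    intro i hi
    simp only [List.mem_range] at hi
    rw [othN_low l hN i (by omega) hi]
    ring_nf
  · apply List.map_congr_left
    intro i hi
    show _ = PySem.Int.powMod a (t * othN l (hN + i)) n
    rw [othN_high l hN i]
    ring_nf

-- A's recursion with an already-reduced base pow(a, t, n)
theorem eval_powbase (a n : Int) : ∀ (m : Nat), ∀ (l : List Int) (t : Nat), l.length = m → l ≠ [] →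
    evaluate_Si l (PySem.Int.powMod a t n) n
      = (List.range l.length).map (fun i => PySem.Int.powMod a (t * othN l i) n) := by
  intro m
  induction m using Nat.strong_induction_on with
  | _ m ih =>
    intro l t hm hne
    by_cases h1 : l.length = 1
    · obtain ⟨x, rfl⟩ := List.length_eq_one_iff.mp h1
      rw [evaluate_Si]
      simp [othN, prodN]
    · have h0 : l.length ≠ 0 := by simpa [List.length_eq_zero_iff] using hne
      have hm2 : 2 ≤ l.length := by omega
      rw [evaluate_Si]
      simp only [if_neg h1, if_neg h0]
      have hh : PySem.Int.floordiv (l.length : Int) 2 = ((l.length / 2 : Nat) : Int) := by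
        rw [PySem.Int.floordiv_eq_ediv_of_pos (by omega)]
        omega
      set hN := l.length / 2 with hNdef
      have h1N : 1 ≤ hN := by omega
      have hNlt : hN < l.length := by omega
      rw [hh, pvSeg_low l _ (by omega) (by simp; omega),
          pvSeg_high l _ (by omega) (by simp; omega),
          pvPowLoop_foldl, pvPowLoop_foldl,
          pvSeg_low l _ (by omega) (by simp; omega),
          pvSeg_high l _ (by omega) (by simp; omega)]
      simp only [Int.toNat_natCast]
      rw [foldl_pow, foldl_pow]
      rw [ih hN (by omega) (l.take hN) (t * prodN (l.drop hN)) (by simp; omega)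
            (List.length_pos_iff.mp (by simp; omega))]
      rw [ih (l.length - hN) (by omega) (l.drop hN) (t * prodN (l.take hN)) (by simp)
            (List.length_pos_iff.mp (by simp; omega))]
      have hlt : (l.take hN).length = hN := by simp; omega
      have hld : (l.drop hN).length = l.length - hN := by simp
      rw [hlt, hld]
      exact glue l a n t hm2

-- A's value on two or more primes
theorem eval_A (l : List Int) (a n : Int) (hm2 : 2 ≤ l.length) :
    evaluate_Si l a n
      = (List.range l.length).map (fun i => PySem.Int.powMod a (othN l i) n) := by
  have h1 : l.length ≠ 1 := by omega
  have h0 : l.length ≠ 0 := by omega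
  rw [evaluate_Si]
  simp only [if_neg h1, if_neg h0]
  have hh : PySem.Int.floordiv (l.length : Int) 2 = ((l.length / 2 : Nat) : Int) := by
    rw [PySem.Int.floordiv_eq_ediv_of_pos (by omega)]
    omega
  set hN := l.length / 2 with hNdef
  have h1N : 1 ≤ hN := by omega
  have hNlt : hN < l.length := by omega
  rw [hh, pvSeg_low l _ (by omega) (by simp; omega),
      pvSeg_high l _ (by omega) (by simp; omega),
      pvPowLoop_foldl, pvPowLoop_foldl,
      pvSeg_low l _ (by omega) (by simp; omega),
      pvSeg_high l _ (by omega) (by simp; omega)]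
  simp only [Int.toNat_natCast]
  rw [foldl_pow_raw _ _ _ (List.length_pos_iff.mp (by simp; omega)),
      foldl_pow_raw _ _ _ (List.length_pos_iff.mp (by simp; omega))]
  rw [show prodN (l.drop hN) = 1 * prodN (l.drop hN) from (one_mul _).symm,
      show prodN (l.take hN) = 1 * prodN (l.take hN) from (one_mul _).symm]
  rw [eval_powbase a n (l.take hN).length (l.take hN) _ rfl
        (List.length_pos_iff.mp (by simp; omega)),
      eval_powbase a n (l.drop hN).length (l.drop hN) _ rfl
        (List.length_pos_iff.mp (by simp; omega))]
  have hlt : (l.take hN).length = hN := by simp; omega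
  have hld : (l.drop hN).length = l.length - hN := by simp
  rw [hlt, hld]
  have := glue l a n 1 hm2
  simpa [one_mul] using this

theorem preProds_eq (l : List Int) : ∀ (c : Int),
    preProds c l = (List.range l.length).map (fun i => c * (l.take i).prod) := by
  induction l with
  | nil => intro c; rfl
  | cons x t ih =>
    intro c
    simp only [preProds, List.length_cons, List.range_succ_eq_map, List.map_cons, List.map_map,
      List.take_zero, List.prod_nil, mul_one]
    rw [ih (c * x)]
    congr 1
    apply List.map_congr_left
    intro i hi
    simp only [Function.comp_apply, List.take_succ_cons, List.prod_cons]
    ring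

theorem sufProds_eq (l : List Int) :
    sufProds l = ((List.range l.length).map (fun i => (l.drop (i + 1)).prod), l.prod) := by
  induction l with
  | nil => rfl
  | cons x t ih =>
    simp only [sufProds, ih, List.length_cons, List.range_succ_eq_map, List.map_cons,
      List.map_map, Prod.mk.injEq]
    refine ⟨?_, by simp⟩
    simp [Function.comp_def]

theorem toNat_prod (l : List Int) (hp : ∀ p ∈ l, 0 ≤ p) : l.prod.toNat = prodN l := by
  induction l with
  | nil => rfl
  | cons x t ih =>
    simp only [List.prod_cons, prodN, List.map_cons]
    rw [Int.toNat_mul (hp x (by simp)) (List.prod_nonneg fun y hy => hp y (by simp [hy]))]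
    rw [ih fun y hy => hp y (by simp [hy])]
    rfl

-- B's value on any list of length ≠ 1
theorem eval_B (l : List Int) (a n : Int) (hl : l.length ≠ 1) (hp : ∀ p ∈ l, 0 ≤ p) :
    evaluate_Si_alt l a n
      = (List.range l.length).map (fun i => PySem.Int.powMod a (othN l i) n) := by
  unfold evaluate_Si_alt
  simp only [pyPowMod_eq]
  rw [if_neg hl, preProds_eq, sufProds_eq, List.zip_map', List.map_map]
  apply List.map_congr_left
  intro i hi
  simp only [Function.comp_apply, one_mul]
  congr 1
  rw [Int.toNat_mul (List.prod_nonneg fun y hy => hp y (List.take_subset _ _ hy))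
        (List.prod_nonneg fun y hy => hp y (List.drop_subset _ _ hy)),
      toNat_prod _ (fun y hy => hp y (List.take_subset _ _ hy)),
      toNat_prod _ (fun y hy => hp y (List.drop_subset _ _ hy))]
  rfl

-- ===== VERDICT (by name: the statement is the Claim_ definition above) =====
theorem evaluate_Si_spec : Claim_equal_evaluate_Si := by
  intro primes a n _hdom hpre
  obtain ⟨hne, hp, _⟩ := hpre
  unfold Spec_evaluate_Si
  by_cases h1 : primes.length = 1
  · obtain ⟨x, rfl⟩ := List.length_eq_one_iff.mp h1
    rw [evaluate_Si, evaluate_Si_alt]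
    simp
  · have hm2 : 2 ≤ primes.length := by
      have : primes.length ≠ 0 := by simpa [List.length_eq_zero_iff] using hne
      omega
    rw [eval_A primes a n hm2, eval_B primes a n h1 hp]
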